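-- pv_equiv track=rewrite | github.com/WingRS/hash_tables_test | task_05.py | select_prine
-- ===== SOURCE A (Python) =====
-- def select_prine(size):
--     lower = size
--     upper = size+3
--     for num in range(lower, upper + 1):
--         if num > 1:
--             for i in range(2, num):
--                 if (num % i) == 0:
--                     break
--             else:
--                 return num
-- ===== SOURCE B (Python) =====
-- def _is_prime(n):
--     if n < 2:
--         return False
--     i = 2
--     while i * i <= n:
--         if n % i == 0:
--             return False
--         i += 1
--     return True
--
--
-- def select_prine(size):
--     for num in (size, size + 1, size + 2, size + 3):
--         if _is_prime(num):
--             return num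
--     return None
-- ===== Notes on version B (the rewrite author's own statement) =====
-- stated objective: faster
-- what changed: B tests each of the four candidates with trial division only up to sqrt(num) in a helper (while i*i <= n), instead of A's scan of every i in range(2, num).
import Mathlib
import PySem

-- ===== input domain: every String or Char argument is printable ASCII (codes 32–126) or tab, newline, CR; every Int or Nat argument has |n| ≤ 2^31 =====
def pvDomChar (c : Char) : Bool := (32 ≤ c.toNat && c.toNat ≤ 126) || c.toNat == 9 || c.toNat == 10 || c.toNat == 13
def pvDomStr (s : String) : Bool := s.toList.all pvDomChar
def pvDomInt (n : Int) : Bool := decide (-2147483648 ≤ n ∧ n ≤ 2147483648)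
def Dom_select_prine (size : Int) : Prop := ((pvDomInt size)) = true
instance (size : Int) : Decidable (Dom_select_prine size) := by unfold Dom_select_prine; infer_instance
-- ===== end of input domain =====

-- B replaces A's trial division over all of range(2, num) by trial division while i*i <= num (objective: faster).

-- ===== PORT A =====
-- inner 'for i in range(2, num): if num % i == 0: break / else: return num'
def pvNoDivA (num : Int) : Bool :=
  (PySem.List.pyRange 2 num 1).all (fun i => !(PySem.Int.mod num i == 0))

-- 'for num in range(lower, upper + 1): if num > 1: … return num'; falls off → None
def select_prine (size : Int) : Option Int :=
  (PySem.List.pyRange size (size + 3 + 1) 1).find? (fun num => decide (1 < num) && pvNoDivA num)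

-- ===== PORT B =====
-- 'while i * i <= n: if n % i == 0: return False; i += 1' — fuel only makes the loop
-- structurally total; with the fuel supplied below the 0-case is never reached
def pvTrial (n : Int) (i : Int) : Nat → Bool
  | 0 => true
  | fuel + 1 =>
    if i * i ≤ n then
      if PySem.Int.mod n i == 0 then false else pvTrial n (i + 1) fuel
    else true

def pvIsPrime (n : Int) : Bool :=
  if n < 2 then false else pvTrial n 2 (n + 1 - 2).toNat

def select_prine_alt (size : Int) : Option Int :=
  [size, size + 1, size + 2, size + 3].find? pvIsPrime

-- ===== PRECONDITION & SPEC =====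
def Spec_select_prine (size : Int) (out : Option Int) : Prop := out = select_prine_alt size
instance (size : Int) (out : Option Int) : Decidable (Spec_select_prine size out) := by unfold Spec_select_prine; infer_instance

-- ===== CLAIM (what is proved, stated in full; the proofs are below) =====
def Claim_equal_select_prine : Prop := ∀ (size : Int), Dom_select_prine size → Spec_select_prine size (select_prine size)

-- ===== LEMMAS AND PROOFS =====

theorem pvTrial_iff (fuel : Nat) : ∀ (n i : Int), (n + 1 - i).toNat ≤ fuel → 2 ≤ i →
    (pvTrial n i fuel = true ↔ ∀ j : Int, i ≤ j → j * j ≤ n → ¬ j ∣ n) := by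
  induction fuel with
  | zero =>
    intro n i hf hi
    have hn : n < i := by omega
    simp only [pvTrial]
    constructor
    · intro _ j hj hjj
      exact absurd hjj (by nlinarith)
    · intro _; trivial
  | succ k ih =>
    intro n i hf hi
    simp only [pvTrial]
    by_cases hii : i * i ≤ n
    · simp only [hii, if_true]
      by_cases hz : PySem.Int.mod n i = 0
      · simp only [hz, beq_self_eq_true, if_true]
        constructor
        · intro h; exact absurd h (by simp)
        · intro h
          exact absurd ((PySem.Int.mod_eq_zero_iff_dvd n i).mp hz) (h i le_rfl hii)
      · have hbeq : (PySem.Int.mod n i == 0) = false := by simpa using hz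
        rw [hbeq]
        simp only [Bool.false_eq_true, if_false]
        have hile : i ≤ n := by nlinarith
        rw [ih n (i + 1) (by omega) (by omega)]
        constructor
        · intro h j hj hjj hdvd
          rcases eq_or_lt_of_le hj with heq | hj'
          · exact hz ((PySem.Int.mod_eq_zero_iff_dvd n i).mpr (heq ▸ hdvd))
          · exact h j (by omega) hjj hdvd
        · intro h j hj hjj hdvd
          exact h j (by omega) hjj hdvd
    · simp only [hii, if_false]
      constructor
      · intro _ j hj hjj hdvd
        have : i * i ≤ j * j := by nlinarith
        exact hii (le_trans this hjj)
      · intro _; trivial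

-- the mathematical core: for num ≥ 2, a divisor in [2, num) exists iff one with j*j ≤ num exists
theorem pvDiv_bridge (n : Int) (hn : 2 ≤ n) :
    (∀ i : Int, 2 ≤ i → i < n → ¬ i ∣ n) ↔ (∀ j : Int, 2 ≤ j → j * j ≤ n → ¬ j ∣ n) := by
  constructor
  · intro h j hj hjj hdvd
    exact h j hj (by nlinarith) hdvd
  · intro h i hi hilt hdvd
    by_cases hii : i * i ≤ n
    · exact h i hi hii hdvd
    · obtain ⟨k, hk⟩ := hdvd
      have hipos : 0 < i := by omega
      have hk2 : 2 ≤ k := by nlinarith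
      have hkk : k * k ≤ n := by nlinarith
      exact h k hk2 hkk ⟨i, by linarith [hk, mul_comm i k]⟩

-- pointwise equality of the two candidate tests
theorem pvPred_eq (n : Int) :
    (decide (1 < n) && pvNoDivA n) = pvIsPrime n := by
  by_cases hn : 1 < n
  · have hn' : ¬ n < 2 := by omega
    simp only [pvIsPrime, hn', if_false, hn, decide_true, Bool.true_and]
    unfold pvNoDivA
    by_cases htr : pvTrial n 2 (n + 1 - 2).toNat = true
    · rw [htr, List.all_eq_true]
      intro i hi
      rw [PySem.List.mem_pyRange_one] at hi
      have hnd := (pvTrial_iff ((n + 1 - 2).toNat) n 2 le_rfl (by omega)).mp htr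
      have := (pvDiv_bridge n (by omega)).mpr (fun j hj hjj => hnd j hj hjj) i hi.1 hi.2
      simp [PySem.Int.mod_eq_zero_iff_dvd, this]
    · have hfalse : pvTrial n 2 (n + 1 - 2).toNat = false := by simpa using htr
      rw [hfalse, List.all_eq_false]
      have hnot : ¬ ∀ j : Int, 2 ≤ j → j * j ≤ n → ¬ j ∣ n :=
        fun h => htr ((pvTrial_iff ((n + 1 - 2).toNat) n 2 le_rfl (by omega)).mpr h)
      push Not at hnot
      obtain ⟨j, hj2, hjj, hdvd⟩ := hnot
      refine ⟨j, ?_, ?_⟩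
      · rw [PySem.List.mem_pyRange_one]
        exact ⟨hj2, by nlinarith⟩
      · simp [PySem.Int.mod_eq_zero_iff_dvd, hdvd]
  · have hn' : n < 2 := by omega
    simp [pvIsPrime, hn', hn]

theorem pvRange4 (a : Int) :
    PySem.List.pyRange a (a + 3 + 1) 1 = [a, a + 1, a + 2, a + 3] := by
  rw [PySem.List.pyRange_one_cons (by omega), PySem.List.pyRange_one_cons (by omega),
      PySem.List.pyRange_one_cons (by omega), PySem.List.pyRange_one_cons (by omega),
      PySem.List.pyRange_one_eq_nil (by omega)]
  norm_num
  exact ⟨by ring, by ring⟩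

-- ===== VERDICT (by name: the statement is the Claim_ definition above) =====
theorem select_prine_spec : Claim_equal_select_prine := by
  intro size _
  unfold Spec_select_prine select_prine select_prine_alt
  rw [pvRange4]
  simp only [List.find?]
  simp only [pvPred_eq]
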